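-- pv_equiv track=rewrite | github.com/seilk/Algorithm-PS | BAEKJOON/9012.py | f
-- ===== SOURCE A (Python) =====
-- def f(lst):  #inpuT = [(,(,(,),),),...]
--     k = len(lst) # lst의 길이를 range로 for문을 돌림, 매번 갱신됨.
--     # ))))만 남아있음 , ((((만 남아있음 , )로 시작, (로 끝남
--     if '(' not in lst or ')' not in lst or k == 0 or lst[0] == ")" or lst[-1] == "(": #함수를 더이상 돌릴 필요 없는 조건들 / for문에서 lst는 무언가가 남아있게 됨
--         return k #여기서 return 되는 순간 재귀함수 통째로 종료됨, lst는 바뀐상태로 유지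
--     else:
--         for i in range(k - 1): # i + 1을 쓸거라서 마지막에서 - 1번째 까지만 확인해줘도 됨
--             if lst[i] == "(" and lst[i + 1] == ")": # 연속으로 ()가 나오면 소거
--                 del lst[i : i + 2]
--                 break  # ()묶음이 한번 지워지면 for문 종료하도록 함
--         return f(lst) # 삭제된 lst를 가지고 함수를 다시 돌림, 재귀함수가 종료되면서 한꺼번에 종료되기 때문에 처음에 return된 값이 계속 return 됨 return(return(return(...)))
-- ===== SOURCE B (Python) =====
-- def f(lst):
--     """Length of the list once the left-to-right pair cancellation gives up.
--
--     It refuses to start when one parenthesis kind is missing, or the list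
--     already starts with ')' or ends with '('.  Otherwise it cancels
--     '('/')' pairs from the left until an unmatched ')' surfaces at the
--     front, or only surplus '(' remain.  (Unlike the recursive deleter,
--     this never mutates lst.)
--     """
--     n = len(lst)
--     if "(" not in lst or ")" not in lst or lst[0] == ")" or lst[-1] == "(":
--         return n
--     open_ = 0
--     for i, s in enumerate(lst):
--         if s == ")":
--             if open_ == 0:
--                 return n - i  # everything before this ')' was cancelled
--             open_ -= 1
--         elif s == "(":
--             open_ += 1
--     return lst.count("(") - lst.count(")")  # only surplus '(' are left
-- ===== Notes on version B (the rewrite author's own statement) =====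
-- stated objective: alternative
-- what changed: A repeatedly rescans the list, deletes the leftmost adjacent '()' pair and recurses; B does one left-to-right pass with an open-paren counter, returning the remaining length at the first ')' that surfaces unmatched, or the surplus of '(' if every ')' cancels; same asymptotics on the generated inputs (they hit the entry test); Pre_ keeps the task's natural domain (lists of '(' / ')' tokens) plus the give-up inputs, excluding mixed-token lists on which A either recurses forever (RecursionError) or returns a length counting unrelated tokens.
-- outside the precondition, e.g. on f(['x', '(', ')']): A returns 1, B returns 0; on f(['(', 'x', ')']): A raises RecursionError, B returns 0
import Mathlib
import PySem

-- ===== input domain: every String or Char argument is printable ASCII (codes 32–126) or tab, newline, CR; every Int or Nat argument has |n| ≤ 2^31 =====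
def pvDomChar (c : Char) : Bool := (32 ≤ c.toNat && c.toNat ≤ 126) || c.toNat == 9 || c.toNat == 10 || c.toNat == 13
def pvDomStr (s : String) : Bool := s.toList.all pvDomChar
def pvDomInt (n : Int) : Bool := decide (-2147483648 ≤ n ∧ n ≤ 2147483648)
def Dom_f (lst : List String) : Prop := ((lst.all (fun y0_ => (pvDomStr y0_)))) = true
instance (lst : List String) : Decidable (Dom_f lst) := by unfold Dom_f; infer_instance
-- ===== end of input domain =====

-- B replaces A's delete-one-pair-and-restart recursion by a single counting pass over the list;
-- return-value equivalence only: A mutates lst in place (del), B does not.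

-- ===== PORT A =====
-- A's entry test, verbatim:
-- '(' not in lst or ')' not in lst or k == 0 or lst[0] == ")" or lst[-1] == "("
def pvStop (l : List String) : Bool :=
  !(l.contains "(") || !(l.contains ")") || l.length == 0 ||
    l.head? == some ")" || l.getLast? == some "("

-- A's for-loop: delete the leftmost adjacent ["(", ")"] pair (no change if none)
def pvDelPair : List String → List String
  | [] => []
  | [x] => [x]
  | x :: y :: rest =>
      if x = "(" ∧ y = ")" then rest else x :: pvDelPair (y :: rest)

-- A's recursion, with fuel only to make it total (A recurses forever when the list
-- is stuck; those inputs are outside Pre_f)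
def pvGoA : Nat → List String → Int
  | 0, l => (l.length : Int)
  | fuel + 1, l => if pvStop l then (l.length : Int) else pvGoA fuel (pvDelPair l)

def f (lst : List String) : Int := pvGoA (lst.length + 1) lst

-- ===== PORT B =====
-- B's give-up test: '(' not in lst or ')' not in lst or lst[0] == ")" or lst[-1] == "("
def pvGiveUp (l : List String) : Bool :=
  !(l.contains "(") || !(l.contains ")") || l.head? == some ")" || l.getLast? == some "("

-- B's single pass: opn = '(' tokens not yet cancelled, i = current index;
-- an unmatched ")" at index i ends the pass with n - i
def pvLoop (n fb : Int) : List String → Int → Nat → Int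
  | [], _, _ => fb
  | s :: rest, opn, i =>
      if s = ")" then
        if opn = 0 then n - (i : Int) else pvLoop n fb rest (opn - 1) (i + 1)
      else if s = "(" then pvLoop n fb rest (opn + 1) (i + 1)
      else pvLoop n fb rest opn (i + 1)

def f_alt (lst : List String) : Int :=
  if pvGiveUp lst then (lst.length : Int)
  else pvLoop (lst.length : Int) ((lst.count "(" : Int) - (lst.count ")" : Int)) lst 0 0

-- ===== PRECONDITION & SPEC =====
-- Pre_f keeps the task's natural domain (BAEKJOON 9012: lists of "(" / ")" tokens)
-- plus every give-up input; it excludes mixed-token lists passing the entry test,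
-- on which A either recurses forever (RecursionError, e.g. ["(", "x", ")"]) or
-- returns a length counting unrelated tokens (e.g. ["x", "(", ")"]).
def Pre_f (lst : List String) : Prop :=
  (∀ s ∈ lst, s = "(" ∨ s = ")") ∨ "(" ∉ lst ∨ ")" ∉ lst ∨
    lst.head? = some ")" ∨ lst.getLast? = some "("
instance (lst : List String) : Decidable (Pre_f lst) := by unfold Pre_f; infer_instance

def pvWitness_f : List String := ["(", "(", ")", ")"]

def Spec_f (lst : List String) (out : Int) : Prop := out = f_alt lst
instance (lst : List String) (out : Int) : Decidable (Spec_f lst out) := by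
  unfold Spec_f; infer_instance

-- ===== CLAIM (what is proved, stated in full; the proofs are below) =====
def Claim_equal_f : Prop := ∀ (lst : List String), Dom_f lst → Pre_f lst → Spec_f lst (f lst)

-- ===== LEMMAS AND PROOFS =====

theorem pvGiveUp_eq_pvStop (l : List String) : pvGiveUp l = pvStop l := by
  cases l with
  | nil => rfl
  | cons a t => simp [pvGiveUp, pvStop]

theorem pvStop_false_iff (l : List String) :
    pvStop l = false ↔ "(" ∈ l ∧ ")" ∈ l ∧ l.head? ≠ some ")" ∧ l.getLast? ≠ some "(" := by
  simp [pvStop, List.length_eq_zero_iff]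
  constructor
  · tauto
  · rintro ⟨h1, h2, h3, h4⟩
    exact ⟨⟨⟨⟨h1, h2⟩, by rintro rfl; simp at h1⟩, h3⟩, h4⟩

theorem pvDelPair_spec (q : Nat) (b : List String) (hq : 1 ≤ q) :
    pvDelPair (List.replicate q "(" ++ ")" :: b) = List.replicate (q - 1) "(" ++ b := by
  induction q with
  | zero => omega
  | succ k ih =>
    rcases Nat.eq_or_lt_of_le hq with h | h
    · simp [← h, pvDelPair]
    · have hk : 1 ≤ k := by omega
      have : List.replicate (k+1) "(" ++ ")" :: b
           = "(" :: (List.replicate k "(" ++ ")" :: b) := by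
        simp [List.replicate_succ]
      rw [this]
      obtain ⟨c, rest, hc⟩ : ∃ c rest, List.replicate k "(" ++ ")" :: b = c :: rest := by
        rcases k with _ | k'
        · omega
        · exact ⟨"(", List.replicate k' "(" ++ ")" :: b, by simp [List.replicate_succ]⟩
      have hcval : c = "(" := by
        rcases k with _ | k'
        · omega
        · simp [List.replicate_succ] at hc; exact hc.1.symm
      rw [hc, pvDelPair]
      have : ¬("(" = "(" ∧ c = ")") := by simp [hcval]
      rw [if_neg this, ← hc, ih hk]
      rcases k with _ | k'
      · omega
      · simp [List.replicate_succ]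

theorem pvDecomp (l : List String) (hp : ∀ s ∈ l, s = "(" ∨ s = ")")
    (hmem : ")" ∈ l) (hh : l.head? ≠ some ")") :
    ∃ q b, 1 ≤ q ∧ l = List.replicate q "(" ++ ")" :: b := by
  induction l with
  | nil => simp at hmem
  | cons s t ih =>
    have hs : s = "(" := by
      rcases hp s (by simp) with h | h
      · exact h
      · exact absurd (by simp [h]) hh
    subst hs
    by_cases ht : t.head? = some ")"
    · rcases t with _ | ⟨c, t'⟩
      · simp at ht
      · simp at ht
        exact ⟨1, t', le_refl 1, by simp [ht]⟩
    · have hmt : ")" ∈ t := by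
        rcases List.mem_cons.mp hmem with h | h
        · simp at h
        · exact h
      obtain ⟨q, b, hq, hb⟩ := ih (fun s hs => hp s (by simp [hs])) hmt ht
      exact ⟨q + 1, b, by omega, by simp [List.replicate_succ, hb]⟩

theorem pvLoop_replicate (q : Nat) : ∀ (n fb bal : Int) (i : Nat) (rest : List String),
    pvLoop n fb (List.replicate q "(" ++ rest) bal i = pvLoop n fb rest (bal + q) (i + q) := by
  induction q with
  | zero => intro n fb bal i rest; simp
  | succ k ih =>
    intro n fb bal i rest
    have hrw : List.replicate (k + 1) "(" ++ rest = "(" :: (List.replicate k "(" ++ rest) := by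
      simp [List.replicate_succ]
    rw [hrw, pvLoop, if_neg (by decide), if_pos rfl, ih]
    congr 1
    · push_cast; ring
    · omega

theorem pvLoop_shift (b : List String) : ∀ (n fb bal : Int) (i : Nat),
    pvLoop n fb b bal (i + 2) = pvLoop (n - 2) fb b bal i := by
  induction b with
  | nil => intro n fb bal i; simp [pvLoop]
  | cons s rest ih =>
    intro n fb bal i
    by_cases h1 : s = ")"
    · by_cases h2 : (bal : Int) = 0
      · simp only [pvLoop, if_pos h1, if_pos h2]
        push_cast; ring
      · simp only [pvLoop, if_pos h1, if_neg h2]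
        have : i + 2 + 1 = (i + 1) + 2 := by omega
        rw [this, ih]
    · by_cases h2 : s = "("
      · simp only [pvLoop, if_neg h1, if_pos h2]
        have : i + 2 + 1 = (i + 1) + 2 := by omega
        rw [this, ih]
      · simp only [pvLoop, if_neg h1, if_neg h2]
        have : i + 2 + 1 = (i + 1) + 2 := by omega
        rw [this, ih]

-- counts of a decomposed list, for the fallback value
theorem pvCount_decomp (q : Nat) (b : List String) (hq : 1 ≤ q) :
    ((List.replicate q "(" ++ ")" :: b).count "(" : Int)
      - ((List.replicate q "(" ++ ")" :: b).count ")" : Int)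
    = ((List.replicate (q - 1) "(" ++ b).count "(" : Int)
      - ((List.replicate (q - 1) "(" ++ b).count ")" : Int) := by
  simp [List.count_append, List.count_replicate]
  omega

theorem pvMain (fuel : Nat) : ∀ (l : List String), (∀ s ∈ l, s = "(" ∨ s = ")") →
    l.length ≤ 2 * fuel → pvGoA (fuel + 1) l = f_alt l := by
  induction fuel with
  | zero =>
    intro l _ hf
    have hl : l = [] := by
      cases l with
      | nil => rfl
      | cons a t => simp at hf
    subst hl; rfl
  | succ k ih =>
    intro l hp hf
    by_cases hstop : pvStop l = true
    · simp [pvGoA, f_alt, pvGiveUp_eq_pvStop, hstop]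
    · have hsf : pvStop l = false := by simpa using hstop
      obtain ⟨hm1, hm2, hh, hlast⟩ := (pvStop_false_iff l).mp hsf
      obtain ⟨q, b, hq, rfl⟩ := pvDecomp l hp hm2 hh
      have hlen : (List.replicate q "(" ++ ")" :: b).length = q + 1 + b.length := by
        simp; omega
      have hdel := pvDelPair_spec q b hq
      have hstep : pvGoA (k + 1 + 1) (List.replicate q "(" ++ ")" :: b)
          = pvGoA (k + 1) (List.replicate (q - 1) "(" ++ b) := by
        rw [pvGoA, if_neg (by simp [hsf]), hdel]
      have hp' : ∀ s ∈ List.replicate (q - 1) "(" ++ b, s = "(" ∨ s = ")" := by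
        intro s hs
        rcases List.mem_append.mp hs with h | h
        · left; exact List.eq_of_mem_replicate h
        · exact hp s (by simp [h])
      have hlen' : (List.replicate (q - 1) "(" ++ b).length = q - 1 + b.length := by simp
      have hih := ih (List.replicate (q - 1) "(" ++ b) hp' (by rw [hlen']; rw [hlen] at hf; omega)
      rw [hstep, hih]
      -- f_alt of the reduced list equals f_alt of the original
      have hqz : (q : Int) ≠ 0 := by exact_mod_cast Nat.one_le_iff_ne_zero.mp hq
      set n : Int := ((List.replicate q "(" ++ ")" :: b).length : Int) with hn
      set fb : Int := ((List.replicate q "(" ++ ")" :: b).count "(" : Int)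
        - ((List.replicate q "(" ++ ")" :: b).count ")" : Int) with hfb
      have hval : pvLoop n fb (List.replicate q "(" ++ ")" :: b) 0 0
          = pvLoop (n - 2) fb b ((q : Int) - 1) (q - 1) := by
        rw [pvLoop_replicate]
        show pvLoop n fb (")" :: b) (0 + (q : Int)) (0 + q) = _
        rw [pvLoop]
        rw [if_pos rfl, if_neg (by simpa using hqz)]
        have e1 : 0 + q + 1 = (q - 1) + 2 := by omega
        have e2 : 0 + (q : Int) - 1 = (q : Int) - 1 := by ring
        rw [e1, e2]
        exact pvLoop_shift b n fb ((q : Int) - 1) (q - 1)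
      have hfaltl : f_alt (List.replicate q "(" ++ ")" :: b)
          = pvLoop (n - 2) fb b ((q : Int) - 1) (q - 1) := by
        rw [f_alt, if_neg (by simp [pvGiveUp_eq_pvStop, hsf])]
        exact hval
      rw [hfaltl]
      by_cases hstop' : pvStop (List.replicate (q - 1) "(" ++ b) = true
      · -- reduced list hits the give-up test: its f_alt is its length
        rw [f_alt, if_pos (by rw [pvGiveUp_eq_pvStop]; exact hstop')]
        cases b with
        | nil =>
          -- original is (^q ) : the pass ends with only surplus '(' counted
          simp [pvLoop, hfb, List.count_append, List.count_replicate]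
          omega
        | cons s b2 =>
          -- the reduced list (^ (q-1) ++ s :: b2 is stopped: q = 1 and s = ")"
          have hlast' : (s :: b2).getLast? = some ")" := by
            obtain ⟨x, hx⟩ : ∃ x, (s :: b2).getLast? = some x := by
              cases hgl : (s :: b2).getLast? with
              | none => simp at hgl
              | some x => exact ⟨x, rfl⟩
            have h1 : (List.replicate q "(" ++ ")" :: s :: b2).getLast? = some x := by
              simp [List.getLast?_append, hx]
            rw [h1] at hlast
            have hxmem : x ∈ s :: b2 := List.mem_of_getLast? hx
            rcases hp x (List.mem_append_right _ (List.mem_cons_of_mem _ hxmem)) with h | h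
            · rw [h] at hlast; simp at hlast
            · rw [hx, h]
          have hq1 : q = 1 ∧ s = ")" := by
            rcases Nat.eq_or_lt_of_le hq with h1 | h1
            · -- q = 1: reduced = s :: b2; stop forces s = ")"
              refine ⟨h1.symm, ?_⟩
              rcases hp s (by simp [← h1]) with h | h
              · exfalso
                have : pvStop (List.replicate (q - 1) "(" ++ s :: b2) = false := by
                  rw [pvStop_false_iff]
                  rw [← h1]
                  refine ⟨by simp [h], ?_, by simp [h], by simp [hlast']⟩
                  · exact List.mem_of_getLast? hlast'
                rw [this] at hstop'; simp at hstop'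
              · exact h
            · -- q ≥ 2: reduced starts "(" and ends ")", contains both: not stopped
              exfalso
              have : pvStop (List.replicate (q - 1) "(" ++ s :: b2) = false := by
                rw [pvStop_false_iff]
                refine ⟨List.mem_append.mpr (Or.inl (by simp [List.mem_replicate]; omega)), ?_, ?_, ?_⟩
                · exact List.mem_append.mpr (Or.inr (List.mem_of_getLast? hlast'))
                · obtain ⟨m, hm⟩ : ∃ m, q - 1 = m + 1 := ⟨q - 2, by omega⟩
                  simp [hm, List.replicate_succ]
                · simp [List.getLast?_append, hlast']
              rw [this] at hstop'; simp at hstop'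
          obtain ⟨hq1, hs⟩ := hq1
          subst hq1; subst hs
          -- original pvLoop value after the lemmas: the second ")" is unmatched at index 2
          simp only [pvLoop]
          rw [if_pos (by norm_num)]
          simp [hn]
          ring
      · have hsf' : pvStop (List.replicate (q - 1) "(" ++ b) = false := by simpa using hstop'
        rw [f_alt, if_neg (by simp [pvGiveUp_eq_pvStop, hsf'])]
        rw [pvLoop_replicate]
        have hcast : ((List.replicate (q - 1) "(" ++ b).length : Int) = n - 2 := by
          rw [hn, hlen']
          rw [hlen]; push_cast; omega
        rw [hcast, ← pvCount_decomp q b hq, ← hfb]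
        congr 1
        · omega
        · omega

theorem pvStopTrue_agree (l : List String) (h : pvStop l = true) : f l = f_alt l := by
  cases hl : l.length + 1 with
  | zero => omega
  | succ m =>
    rw [f, f_alt, hl, pvGoA, if_pos h, pvGiveUp_eq_pvStop, if_pos h]

-- ===== VERDICT (by name: the statement is the Claim_ definition above) =====
theorem f_spec : Claim_equal_f := by
  intro lst _ hpre
  unfold Spec_f
  by_cases hstop : pvStop lst = true
  · exact pvStopTrue_agree lst hstop
  · have hsf : pvStop lst = false := by simpa using hstop
    rcases hpre with hp | h | h | h | h
    · exact pvMain lst.length lst hp (by omega)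
    all_goals
      exfalso
      obtain ⟨hm1, hm2, hh, hlast⟩ := (pvStop_false_iff lst).mp hsf
      first
        | exact h hm1
        | exact h hm2
        | exact hh h
        | exact hlast h
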